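-- pv_equiv track=rewrite | github.com/nitesh16s/DS-Algo-Problems | CodeChef/Feb Challenge/team_name_optimal.py | teamNames
-- ===== SOURCE A (Python) =====
-- from itertools import permutations
--
-- def teamNames(words, n):
--     words = set(words)
--     firstLetters = set()
--     names = set()
--
--     for word in words:
--         firstLetters.add(word[0])
--
--     if len(firstLetters) == 1:
--         return 0
--
--     for word in words:
--         for first in firstLetters:
--             name = list(word)
--             name[0] = first
--             name = ''.join(name)
--             if name not in words:
--                 names.add(name)
--
--     ans = 0
--     names = permutations(names, 2)
--     seen = {}
--
--     for name in names:
--         if name not in seen: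
--             name1, name2 = list(name[0]), list(name[1])
--             name1[0], name2[0] = name2[0], name1[0]
--             if ''.join(name1) in words and ''.join(name2) in words:
--                 ans += 1
--
--     return ans
-- ===== SOURCE B (Python) =====
-- def teamNames(words, n):
--     # Counts ordered pairs of distinct words directly: (w1, w2) contributes iff
--     # swapping their first letters yields two non-words (head-swap bijection with A's name-pair count).
--     ws = set(words)
--     ans = 0
--     for w1 in ws:
--         for w2 in ws:
--             if w2[0] + w1[1:] not in ws and w1[0] + w2[1:] not in ws:
--                 ans += 1
--     return ans
-- ===== Notes on version B (the rewrite author's own statement) =====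
-- stated objective: faster
-- what changed: B drops A's generated candidate-name set (up to 26n strings) and its scan over all ordered pairs of candidates (with string rebuilds per pair) and instead counts ordered pairs of words (w1, w2) whose first-letter swap produces two non-words, which is the same count via the head-swap bijection.
import Mathlib
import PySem

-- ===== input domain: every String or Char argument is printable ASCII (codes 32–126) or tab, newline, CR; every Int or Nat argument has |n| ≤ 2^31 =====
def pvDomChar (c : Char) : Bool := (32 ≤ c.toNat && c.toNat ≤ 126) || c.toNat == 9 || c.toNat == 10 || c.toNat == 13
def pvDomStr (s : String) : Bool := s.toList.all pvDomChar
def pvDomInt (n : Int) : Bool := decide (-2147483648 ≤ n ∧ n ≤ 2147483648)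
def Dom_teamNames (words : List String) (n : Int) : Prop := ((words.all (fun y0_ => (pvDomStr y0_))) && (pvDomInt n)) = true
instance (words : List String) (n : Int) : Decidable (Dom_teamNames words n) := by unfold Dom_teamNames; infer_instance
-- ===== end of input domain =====

-- B replaces A's 26×-inflated candidate-name set and its quadratic scan over ordered
-- pairs of candidates by a direct double loop over the words themselves (head-swap
-- bijection); equivalence is about the return value only (neither mutates its input).

-- ===== PORT A =====
def teamNames (words : List String) (n : Int) : Int :=
  -- strings are modelled as List Char; word[0] is PySem.List.pyGetD _ 0 ' ' (the
  -- default is only reachable for an empty word, which Pre_ excludes)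
  let ws : PySem.Set (List Char) := PySem.Set.ofList (words.map String.toList)
  let firstLetters : PySem.Set Char :=
    ws.foldl (fun fl word => PySem.Set.add fl (PySem.List.pyGetD word 0 ' ')) PySem.Set.empty
  if PySem.Set.len firstLetters = 1 then 0
  else
    let names : PySem.Set (List Char) :=
      ws.foldl (fun ns word =>
        firstLetters.foldl (fun ns first =>
          let name := PySem.List.pySetD word 0 first
          if PySem.Set.contains ws name then ns else PySem.Set.add ns name) ns) PySem.Set.empty
    let seen : PySem.Dict (List (List Char)) Int := PySem.Dict.empty
    (PySem.List.permutations names 2).foldl (fun ans name =>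
      if seen.contains name then ans
      else
        match name with
        | [x, y] =>
          let name1 := PySem.List.pySetD x 0 (PySem.List.pyGetD y 0 ' ')
          let name2 := PySem.List.pySetD y 0 (PySem.List.pyGetD x 0 ' ')
          if PySem.Set.contains ws name1 && PySem.Set.contains ws name2 then ans + 1 else ans
        | _ => ans) 0

-- ===== PORT B =====
def teamNames_alt (words : List String) (n : Int) : Int :=
  let ws : PySem.Set (List Char) := PySem.Set.ofList (words.map String.toList)
  ws.foldl (fun ans w1 =>
    ws.foldl (fun ans w2 =>
      if !(PySem.Set.contains ws (PySem.List.pyGetD w2 0 ' ' :: PySem.List.slice w1 (some 1) none))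
         && !(PySem.Set.contains ws (PySem.List.pyGetD w1 0 ' ' :: PySem.List.slice w2 (some 1) none))
      then ans + 1 else ans) ans) 0

-- ===== PRECONDITION & SPEC =====
-- Pre_ excludes inputs containing an empty word: there Python A (and B) raise IndexError on word[0].
def Pre_teamNames (words : List String) (n : Int) : Prop := ∀ w ∈ words, w ≠ ""
instance (words : List String) (n : Int) : Decidable (Pre_teamNames words n) := by
  unfold Pre_teamNames; infer_instance
def pvWitness_teamNames : List String × Int := (["ab", "bb", "ba"], 3)

def Spec_teamNames (words : List String) (n : Int) (out : Int) : Prop := out = teamNames_alt words n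
instance (words : List String) (n : Int) (out : Int) : Decidable (Spec_teamNames words n out) := by unfold Spec_teamNames; infer_instance

-- ===== CLAIM (what is proved, stated in full; the proofs are below) =====
def Claim_equal_teamNames : Prop := ∀ (words : List String) (n : Int), Dom_teamNames words n → Pre_teamNames words n → Spec_teamNames words n (teamNames words n)

-- ===== LEMMAS AND PROOFS =====

-- abbreviations for the values A's and B's ports build
def tnW (words : List String) : PySem.Set (List Char) :=
  PySem.Set.ofList (words.map String.toList)
def tnF (W : PySem.Set (List Char)) : PySem.Set Char :=
  W.foldl (fun fl word => PySem.Set.add fl (PySem.List.pyGetD word 0 ' ')) PySem.Set.empty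
def tnN (W : PySem.Set (List Char)) (F : PySem.Set Char) : PySem.Set (List Char) :=
  W.foldl (fun ns word =>
    F.foldl (fun ns first =>
      if PySem.Set.contains W (PySem.List.pySetD word 0 first) then ns
      else PySem.Set.add ns (PySem.List.pySetD word 0 first)) ns) PySem.Set.empty
def tnQA (W : PySem.Set (List Char)) (x y : List Char) : Bool :=
  PySem.Set.contains W (PySem.List.pySetD x 0 (PySem.List.pyGetD y 0 ' ')) &&
  PySem.Set.contains W (PySem.List.pySetD y 0 (PySem.List.pyGetD x 0 ' '))
def tnQA2 (W : PySem.Set (List Char)) : List (List Char) → Bool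
  | [x, y] => tnQA W x y
  | _ => false
def tnQB (W : PySem.Set (List Char)) (w1 w2 : List Char) : Bool :=
  !(PySem.Set.contains W (PySem.List.pyGetD w2 0 ' ' :: PySem.List.slice w1 (some 1) none)) &&
  !(PySem.Set.contains W (PySem.List.pyGetD w1 0 ' ' :: PySem.List.slice w2 (some 1) none))
def tnSwap : List Char × List Char → List Char × List Char
  | (a :: xr, b :: yr) => (b :: xr, a :: yr)
  | p => p

-- generic Set-fold lemmas
lemma tn_mem_foldl_addIf {α β : Type} [BEq α] [LawfulBEq α] (l : List β) (g : β → α)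
    (W : PySem.Set α) (s : PySem.Set α) (y : α) :
    (y ∈ l.foldl (fun s c => if PySem.Set.contains W (g c) then s else PySem.Set.add s (g c)) s) ↔
      y ∈ s ∨ ∃ c ∈ l, y = g c ∧ ¬ (g c ∈ W) := by
  induction l generalizing s with
  | nil => simp
  | cons c l ih =>
    simp only [List.foldl_cons]
    by_cases hc : PySem.Set.contains W (g c) = true
    · rw [if_pos hc, ih]
      have hc' : g c ∈ W := by simpa [PySem.Set.contains_iff] using hc
      constructor
      · rintro (h | h)
        · exact Or.inl h
        · exact Or.inr (by rcases h with ⟨d, hd, h1, h2⟩; exact ⟨d, List.mem_cons_of_mem _ hd, h1, h2⟩)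
      · rintro (h | ⟨d, hd, h1, h2⟩)
        · exact Or.inl h
        · rcases List.mem_cons.mp hd with rfl | hd'
          · exact absurd hc' h2
          · exact Or.inr ⟨d, hd', h1, h2⟩
    · rw [if_neg hc, ih]
      have hc' : ¬ (g c ∈ W) := by simpa [PySem.Set.contains_iff] using hc
      simp only [PySem.Set.mem_add]
      constructor
      · rintro ((h | rfl) | h)
        · exact Or.inl h
        · exact Or.inr ⟨c, List.mem_cons_self .., rfl, hc'⟩
        · rcases h with ⟨d, hd, h1, h2⟩
          exact Or.inr ⟨d, List.mem_cons_of_mem _ hd, h1, h2⟩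
      · rintro (h | ⟨d, hd, h1, h2⟩)
        · exact Or.inl (Or.inl h)
        · rcases List.mem_cons.mp hd with rfl | hd'
          · exact Or.inl (Or.inr h1)
          · exact Or.inr ⟨d, hd', h1, h2⟩

lemma tn_nodup_foldl_addIf {α β : Type} [BEq α] [LawfulBEq α] (l : List β) (g : β → α)
    (W : PySem.Set α) (s : PySem.Set α) (h : s.Nodup) :
    (l.foldl (fun s c => if PySem.Set.contains W (g c) then s else PySem.Set.add s (g c)) s).Nodup := by
  induction l generalizing s with
  | nil => exact h
  | cons c l ih =>
    simp only [List.foldl_cons]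
    split
    · exact ih _ h
    · exact ih _ (PySem.Set.nodup_add _ _ h)

lemma tn_mem_F (W : PySem.Set (List Char)) (c : Char) :
    c ∈ tnF W ↔ ∃ w ∈ W, c = PySem.List.pyGetD w 0 ' ' := by
  unfold tnF
  rw [PySem.Set.mem_foldl_add]
  simp [PySem.Set.empty]

lemma tn_mem_N (W : PySem.Set (List Char)) (F : PySem.Set Char) (x : List Char) :
    x ∈ tnN W F ↔ ∃ w ∈ W, ∃ c ∈ F, x = PySem.List.pySetD w 0 c ∧ ¬ (PySem.List.pySetD w 0 c ∈ W) := by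
  unfold tnN
  have main : ∀ (l : List (List Char)) (s : PySem.Set (List Char)),
      (x ∈ l.foldl (fun ns word =>
        F.foldl (fun ns first =>
          if PySem.Set.contains W (PySem.List.pySetD word 0 first) then ns
          else PySem.Set.add ns (PySem.List.pySetD word 0 first)) ns) s) ↔
      x ∈ s ∨ ∃ w ∈ l, ∃ c ∈ F, x = PySem.List.pySetD w 0 c ∧ ¬ (PySem.List.pySetD w 0 c ∈ W) := by
    intro l
    induction l with
    | nil => simp
    | cons w l ih =>
      intro s
      simp only [List.foldl_cons]
      rw [ih, tn_mem_foldl_addIf]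
      constructor
      · rintro ((h | ⟨c, hc, h1, h2⟩) | ⟨w', hw', c, hc, h1, h2⟩)
        · exact Or.inl h
        · exact Or.inr ⟨w, List.mem_cons_self .., c, hc, h1, h1 ▸ h2⟩
        · exact Or.inr ⟨w', List.mem_cons_of_mem _ hw', c, hc, h1, h2⟩
      · rintro (h | ⟨w', hw', c, hc, h1, h2⟩)
        · exact Or.inl (Or.inl h)
        · rcases List.mem_cons.mp hw' with rfl | hw''
          · exact Or.inl (Or.inr ⟨c, hc, h1, h1 ▸ h2⟩)
          · exact Or.inr ⟨w', hw'', c, hc, h1, h2⟩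
  rw [main]
  simp [PySem.Set.empty]

lemma tn_nodup_N (W : PySem.Set (List Char)) (F : PySem.Set Char) : (tnN W F).Nodup := by
  unfold tnN
  have main : ∀ (l : List (List Char)) (s : PySem.Set (List Char)), s.Nodup →
      (l.foldl (fun ns word =>
        F.foldl (fun ns first =>
          if PySem.Set.contains W (PySem.List.pySetD word 0 first) then ns
          else PySem.Set.add ns (PySem.List.pySetD word 0 first)) ns) s).Nodup := by
    intro l
    induction l with
    | nil => exact fun s h => h
    | cons w l ih => exact fun s h => ih _ (tn_nodup_foldl_addIf _ _ _ _ h)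
  exact main _ _ List.nodup_nil

lemma tn_pySetD_zero_cons {α : Type} (h : α) (t : List α) (c : α) :
    PySem.List.pySetD (h :: t) 0 c = c :: t := by
  simp [PySem.List.pySetD, PySem.List.pySet?, PySem.List.pyIdx?]

-- permutations with r = 1 and the count over permutations with r = 2
lemma tn_flatMap_range {α : Type} (t : List α) (f : Nat → List (List α))
    (hf : ∀ (i : Nat) (hi : i < t.length), f i = [[t[i]]]) :
    (List.range t.length).flatMap f = t.map (fun y => [y]) := by
  induction t generalizing f with
  | nil => simp
  | cons a u ih =>
    simp only [List.length_cons, List.range_succ_eq_map, List.flatMap_cons, List.flatMap_map,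
      List.map_cons]
    rw [hf 0 (by simp), ih (fun i => f i.succ)
      (fun i hi => by simpa using hf (i + 1) (by simpa using hi))]
    rfl

lemma tn_perm_one {α : Type} (xs : List α) :
    PySem.List.permutations xs 1 = xs.map (fun y => [y]) := by
  rw [PySem.List.permutations_succ]
  refine tn_flatMap_range xs _ fun i hi => ?_
  simp [List.getElem?_eq_getElem hi, PySem.List.permutations_zero]

lemma tn_eraseIdx_eq_filter {α : Type} [BEq α] [LawfulBEq α] (xs : List α) (hx : xs.Nodup)
    (i : Nat) (hi : i < xs.length) :
    xs.eraseIdx i = xs.filter (fun y => !(y == xs[i])) := by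
  induction xs generalizing i with
  | nil => simp at hi
  | cons a t ih =>
    cases i with
    | zero =>
      simp only [List.eraseIdx_cons_zero, List.getElem_cons_zero, List.filter_cons]
      rw [if_neg (by simp)]
      refine (List.filter_eq_self.mpr fun y hy => ?_).symm
      simp only [Bool.not_eq_true', beq_eq_false_iff_ne]
      exact fun h => (List.nodup_cons.mp hx).1 (h ▸ hy)
    | succ j =>
      have hj : j < t.length := by simpa using hi
      simp only [List.eraseIdx_cons_succ, List.getElem_cons_succ, List.filter_cons]
      rw [if_pos (by
        simp only [Bool.not_eq_true', beq_eq_false_iff_ne]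
        exact fun h => (List.nodup_cons.mp hx).1 (h ▸ t.getElem_mem hj)), 
        ih (List.nodup_cons.mp hx).2 j hj]

lemma tn_sum_range {α : Type} (t : List α) (f : Nat → Nat) (g : α → Nat)
    (hf : ∀ (i : Nat) (hi : i < t.length), f i = g t[i]) :
    ((List.range t.length).map f).sum = (t.map g).sum := by
  induction t generalizing f with
  | nil => simp
  | cons a u ih =>
    simp only [List.length_cons, List.range_succ_eq_map, List.map_cons, List.map_map,
      List.sum_cons]
    rw [hf 0 (by simp), ih (f ∘ Nat.succ)
      (fun i hi => by simpa [Function.comp] using hf (i + 1) (by simpa using hi))]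
    rfl

lemma tn_countP_permutations_two {α : Type} [BEq α] [LawfulBEq α] (xs : List α) (hx : xs.Nodup)
    (q : List α → Bool) :
    (PySem.List.permutations xs 2).countP q
      = (xs.map (fun x => xs.countP (fun y => q [x, y] && !(y == x)))).sum := by
  rw [PySem.List.permutations_succ, List.countP_flatMap]
  refine tn_sum_range xs _ _ fun i hi => ?_
  simp only [Function.comp, List.getElem?_eq_getElem hi]
  rw [tn_perm_one, List.map_map, List.countP_map,
    tn_eraseIdx_eq_filter xs hx i hi, List.countP_filter]
  rfl

-- counting bridges
lemma tn_countP_toFinset {α : Type} [DecidableEq α] (l : List α) (hl : l.Nodup) (p : α → Bool) :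
    l.countP p = (l.toFinset.filter (fun a => p a = true)).card := by
  rw [← List.toFinset_filter, List.toFinset_card_of_nodup (hl.filter p), List.countP_eq_length_filter]

lemma tn_double_count {α : Type} [DecidableEq α] (l : List α) (hl : l.Nodup)
    (P : α → α → Bool) :
    ((l.map (fun x => l.countP (fun y => P x y))).sum : Nat)
      = ((l.toFinset ×ˢ l.toFinset).filter (fun p : α × α => P p.1 p.2 = true)).card := by
  rw [← List.sum_toFinset _ hl]
  rw [Finset.card_filter, Finset.sum_product' _ _ (fun a b => if P a b = true then 1 else 0)]
  refine Finset.sum_congr rfl fun x _ => ?_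
  rw [tn_countP_toFinset _ hl, Finset.card_filter]

-- the two ports, re-stated through the abbreviations
lemma tn_A_fold (W : PySem.Set (List Char)) (N : List (List Char)) :
    (PySem.List.permutations N 2).foldl (fun ans name =>
      if (PySem.Dict.empty (κ := List (List Char)) (ν := Int)).contains name then ans
      else
        match name with
        | [x, y] => if tnQA W x y then ans + 1 else ans
        | _ => ans) 0
    = ((PySem.List.permutations N 2).countP (tnQA2 W) : Int) := by
  have hfun : (fun (ans : Int) (name : List (List Char)) =>
      if (PySem.Dict.empty (κ := List (List Char)) (ν := Int)).contains name then ans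
      else
        match name with
        | [x, y] => if tnQA W x y then ans + 1 else ans
        | _ => ans)
      = (fun (ans : Int) name => if tnQA2 W name = true then ans + 1 else ans) := by
    funext ans name
    rw [PySem.Dict.contains_empty]
    rcases name with _ | ⟨x, _ | ⟨y, _ | _⟩⟩ <;> simp [tnQA2]
  rw [hfun, PySem.List.foldl_if_add_one]
  simp

lemma tn_A_eq (words : List String) (n : Int) :
    teamNames words n =
      if PySem.Set.len (tnF (tnW words)) = 1 then 0
      else ((PySem.List.permutations (tnN (tnW words) (tnF (tnW words))) 2).countP
          (tnQA2 (tnW words)) : Int) := by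
  have hA : teamNames words n =
      (if PySem.Set.len (tnF (tnW words)) = 1 then 0
      else (PySem.List.permutations (tnN (tnW words) (tnF (tnW words))) 2).foldl (fun ans name =>
        if (PySem.Dict.empty (κ := List (List Char)) (ν := Int)).contains name then ans
        else
          match name with
          | [x, y] => if tnQA (tnW words) x y then ans + 1 else ans
          | _ => ans) 0) := rfl
  rw [hA]
  by_cases h : PySem.Set.len (tnF (tnW words)) = 1
  · rw [if_pos h, if_pos h]
  · rw [if_neg h, if_neg h, tn_A_fold]

lemma tn_B_fold (W : PySem.Set (List Char)) (Q : List Char → List Char → Bool) :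
    W.foldl (fun ans w1 => W.foldl (fun ans w2 => if Q w1 w2 then ans + 1 else ans) ans) (0 : Int)
      = ((W.map (fun w1 => W.countP (fun w2 => Q w1 w2))).sum : Int) := by
  have h1 : (fun (ans : Int) (w1 : List Char) =>
        W.foldl (fun ans w2 => if Q w1 w2 then ans + 1 else ans) ans)
      = (fun (ans : Int) w1 => ans + (W.countP (fun w2 => Q w1 w2) : Int)) := by
    funext ans w1
    exact PySem.List.foldl_if_add_one _ _ _
  rw [h1, PySem.List.foldl_add, Nat.cast_list_sum, List.map_map, zero_add]
  rfl

lemma tn_B_eq (words : List String) (n : Int) :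
    teamNames_alt words n =
      (((tnW words).map (fun w1 => (tnW words).countP (fun w2 => tnQB (tnW words) w1 w2))).sum : Int) :=
  tn_B_fold (tnW words) (tnQB (tnW words))

-- B counts nothing when all words share one first letter
lemma tn_B_zero (words : List String)
    (hne : ∀ w ∈ tnW words, w ≠ [])
    (h1 : PySem.Set.len (tnF (tnW words)) = 1) :
    (((tnW words).map (fun w1 => (tnW words).countP (fun w2 => tnQB (tnW words) w1 w2))).sum : Nat) = 0 := by
  obtain ⟨c, hc⟩ : ∃ c, tnF (tnW words) = [c] := by
    unfold PySem.Set.len at h1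
    exact List.length_eq_one_iff.mp (by omega)
  apply List.sum_eq_zero
  intro x hx
  rcases List.mem_map.mp hx with ⟨w1, hw1, rfl⟩
  rw [List.countP_eq_zero]
  intro w2 hw2
  obtain ⟨a, t, rfl⟩ := List.exists_cons_of_ne_nil (hne w1 hw1)
  obtain ⟨b, u, rfl⟩ := List.exists_cons_of_ne_nil (hne w2 hw2)
  have ha : a ∈ tnF (tnW words) :=
    (tn_mem_F _ _).mpr ⟨_, hw1, (PySem.List.pyGetD_zero_cons _ _ _).symm⟩
  have hb : b ∈ tnF (tnW words) :=
    (tn_mem_F _ _).mpr ⟨_, hw2, (PySem.List.pyGetD_zero_cons _ _ _).symm⟩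
  rw [hc, List.mem_singleton] at ha hb
  subst ha; subst hb
  unfold tnQB
  simp only [PySem.List.pyGetD_zero_cons, PySem.List.slice_from_one, List.tail_cons,
    Bool.and_eq_true, Bool.not_eq_true', not_and]
  intro hcon
  rw [← PySem.Set.contains_iff] at hw1
  rw [hw1] at hcon
  simp at hcon

-- the head-swap bijection between A's name pairs and B's word pairs
lemma tn_main (words : List String)
    (hne : ∀ w ∈ tnW words, w ≠ []) :
    ((PySem.List.permutations (tnN (tnW words) (tnF (tnW words))) 2).countP
        (tnQA2 (tnW words)) : Nat)
      = (((tnW words).map (fun w1 => (tnW words).countP (fun w2 => tnQB (tnW words) w1 w2))).sum : Nat) := by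
  set W := tnW words with hWdef
  set F := tnF W with hFdef
  set N := tnN W F with hNdef
  have hW : W.Nodup := PySem.Set.nodup_ofList _
  have hN : N.Nodup := tn_nodup_N _ _
  rw [tn_countP_permutations_two _ hN]
  have hpair : ∀ x y : List Char, tnQA2 W [x, y] = tnQA W x y := fun _ _ => rfl
  simp only [hpair]
  have hdc1 := tn_double_count N hN (fun x y => tnQA W x y && !(y == x))
  have hdc2 := tn_double_count W hW (fun w1 w2 => tnQB W w1 w2)
  beta_reduce at hdc1 hdc2
  rw [hdc1, hdc2]
  -- supporting facts
  have hshape : ∀ x ∈ N, x ∉ W ∧ ∃ a xr, x = a :: xr := by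
    intro x hx
    rcases (tn_mem_N W F x).mp hx with ⟨w, hw, c, hcF, rfl, hnot⟩
    obtain ⟨h0, t0, rfl⟩ := List.exists_cons_of_ne_nil (hne w hw)
    rw [tn_pySetD_zero_cons] at hnot ⊢
    exact ⟨hnot, c, t0, rfl⟩
  have hintro : ∀ (a b : Char) (xr : List Char),
      (b :: xr) ∈ W → a ∈ F → (a :: xr) ∉ W → (a :: xr) ∈ N := by
    intro a b xr hbw haF hnot
    refine (tn_mem_N W F _).mpr ⟨b :: xr, hbw, a, haF, ?_, ?_⟩
    · rw [tn_pySetD_zero_cons]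
    · rw [tn_pySetD_zero_cons]; exact hnot
  have hheadF : ∀ (a : Char) (yr : List Char), (a :: yr) ∈ W → a ∈ F := fun a yr h =>
    (tn_mem_F W a).mpr ⟨_, h, (PySem.List.pyGetD_zero_cons _ _ _).symm⟩
  have hQA : ∀ (a : Char) (xr : List Char) (b : Char) (yr : List Char),
      tnQA W (a :: xr) (b :: yr) = true ↔ (b :: xr) ∈ W ∧ (a :: yr) ∈ W := by
    intro a xr b yr
    unfold tnQA
    rw [PySem.List.pyGetD_zero_cons, PySem.List.pyGetD_zero_cons,
      tn_pySetD_zero_cons, tn_pySetD_zero_cons]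
    simp
  have hQB : ∀ (a : Char) (xr : List Char) (b : Char) (yr : List Char),
      tnQB W (a :: xr) (b :: yr) = true ↔ (b :: xr) ∉ W ∧ (a :: yr) ∉ W := by
    intro a xr b yr
    unfold tnQB
    simp only [PySem.List.pyGetD_zero_cons, PySem.List.slice_from_one, List.tail_cons,
      Bool.and_eq_true, Bool.not_eq_true']
    rw [← Bool.not_eq_true (PySem.Set.contains W (b :: xr)),
      ← Bool.not_eq_true (PySem.Set.contains W (a :: yr))]
    simp
  apply Finset.card_nbij' tnSwap tnSwap
  · -- A-pairs map into B-pairs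
    rintro ⟨x, y⟩ hp
    rw [Finset.mem_coe, Finset.mem_filter, Finset.mem_product, List.mem_toFinset,
      List.mem_toFinset] at hp
    obtain ⟨⟨hx, hy⟩, hcond⟩ := hp
    obtain ⟨hxnW, a, xr, rfl⟩ := hshape x hx
    obtain ⟨hynW, b, yr, rfl⟩ := hshape y hy
    rw [Bool.and_eq_true] at hcond
    obtain ⟨h1, h2⟩ := (hQA a xr b yr).mp hcond.1
    show (b :: xr, a :: yr) ∈ _
    rw [Finset.mem_coe, Finset.mem_filter, Finset.mem_product, List.mem_toFinset,
      List.mem_toFinset]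
    exact ⟨⟨h1, h2⟩, (hQB b xr a yr).mpr ⟨hxnW, hynW⟩⟩
  · -- B-pairs map into A-pairs
    rintro ⟨w1, w2⟩ hp
    rw [Finset.mem_coe, Finset.mem_filter, Finset.mem_product, List.mem_toFinset,
      List.mem_toFinset] at hp
    obtain ⟨⟨hw1, hw2⟩, hcond⟩ := hp
    obtain ⟨b, xr, rfl⟩ := List.exists_cons_of_ne_nil (hne w1 hw1)
    obtain ⟨a, yr, rfl⟩ := List.exists_cons_of_ne_nil (hne w2 hw2)
    obtain ⟨hx', hy'⟩ := (hQB b xr a yr).mp hcond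
    show (a :: xr, b :: yr) ∈ _
    rw [Finset.mem_coe, Finset.mem_filter, Finset.mem_product, List.mem_toFinset,
      List.mem_toFinset]
    refine ⟨⟨hintro a b xr hw1 (hheadF a yr hw2) hx',
            hintro b a yr hw2 (hheadF b xr hw1) hy'⟩, ?_⟩
    rw [Bool.and_eq_true]
    refine ⟨(hQA a xr b yr).mpr ⟨hw1, hw2⟩, ?_⟩
    simp only [Bool.not_eq_true', beq_eq_false_iff_ne]
    intro hcon
    rw [List.cons.injEq] at hcon
    exact hx' (hcon.1 ▸ hw1)
  · -- left inverse on A-pairs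
    rintro ⟨x, y⟩ hp
    rw [Finset.mem_coe, Finset.mem_filter, Finset.mem_product, List.mem_toFinset,
      List.mem_toFinset] at hp
    obtain ⟨⟨hx, hy⟩, _⟩ := hp
    obtain ⟨-, a, xr, rfl⟩ := hshape x hx
    obtain ⟨-, b, yr, rfl⟩ := hshape y hy
    rfl
  · -- right inverse on B-pairs
    rintro ⟨w1, w2⟩ hp
    rw [Finset.mem_coe, Finset.mem_filter, Finset.mem_product, List.mem_toFinset,
      List.mem_toFinset] at hp
    obtain ⟨⟨hw1, hw2⟩, -⟩ := hp
    obtain ⟨b, xr, rfl⟩ := List.exists_cons_of_ne_nil (hne w1 hw1)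
    obtain ⟨a, yr, rfl⟩ := List.exists_cons_of_ne_nil (hne w2 hw2)
    rfl

-- ===== VERDICT (by name: the statement is the Claim_ definition above) =====
theorem teamNames_spec : Claim_equal_teamNames := by
  intro words n hdom hpre
  unfold Spec_teamNames
  have hne : ∀ w ∈ tnW words, w ≠ [] := by
    intro w hw
    rcases List.mem_map.mp ((PySem.Set.mem_ofList _ _).mp hw) with ⟨s, hs, rfl⟩
    intro hcon
    exact hpre s hs (String.toList_eq_nil_iff.mp hcon)
  rw [tn_A_eq, tn_B_eq]
  by_cases h1 : PySem.Set.len (tnF (tnW words)) = 1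
  · rw [if_pos h1]
    have := tn_B_zero words hne h1
    omega
  · rw [if_neg h1]
    exact_mod_cast tn_main words hne
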